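-- pv_equiv track=rewrite | github.com/lxcxjxhx/HOS-LS | src/analyzers/code_vuln_scanner.py | _build_commented_method_index
-- ===== SOURCE A (Python) =====
-- from typing import List, Dict, Any, Optional, Set, Tuple
--
-- def _build_commented_method_index(lines: List[str]) -> Dict[int, bool]:
--     """构建被注释方法行的索引
--
--     Returns:
--         Dict[int, bool]: key 是方法定义行号，value True 表示该方法被注释
--     """
--     result = {}
--     method_modifiers = ['public', 'private', 'protected', 'def ', 'function ', 'class ']
--
--     for i, line in enumerate(lines):
--         stripped = line.strip()
--
--         if stripped.startswith('//') and any(mod in stripped for mod in method_modifiers):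
--             for j in range(i + 1, len(lines)):
--                 next_line = lines[j].strip()
--                 if next_line.startswith('//'):
--                     continue
--                 if any(mod in next_line for mod in method_modifiers):
--                     result[j + 1] = True
--                     break
--
--     return result
-- ===== SOURCE B (Python) =====
-- def _build_commented_method_index(lines):
--     """Backward pass precomputes, for each position, the nearest following
--     non-comment line containing a method modifier; the forward pass then answers
--     each commented-method line by a single lookup."""
--     mods = ('public', 'private', 'protected', 'def ', 'function ', 'class ')
--     n = len(lines)
--     nxt = [None] * (n + 1)
--     for i in range(n - 1, -1, -1):
--         s = lines[i].strip()
--         if not s.startswith('//') and any(m in s for m in mods):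
--             nxt[i] = i
--         else:
--             nxt[i] = nxt[i + 1]
--     result = {}
--     for i, line in enumerate(lines):
--         s = line.strip()
--         if s.startswith('//') and any(m in s for m in mods):
--             j = nxt[i + 1]
--             if j is not None:
--                 result[j + 1] = True
--     return result
-- ===== Notes on version B (the rewrite author's own statement) =====
-- stated objective: alternative
-- what changed: Replaces A's per-commented-line forward rescan with one backward pass that precomputes the nearest following non-comment modifier line, so each commented line is answered by a single array lookup (removes the nested rescan; worst case O(n) vs A's O(n^2), but not measurably faster on the timing inputs, where A's rescans are rare).
import Mathlib
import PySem

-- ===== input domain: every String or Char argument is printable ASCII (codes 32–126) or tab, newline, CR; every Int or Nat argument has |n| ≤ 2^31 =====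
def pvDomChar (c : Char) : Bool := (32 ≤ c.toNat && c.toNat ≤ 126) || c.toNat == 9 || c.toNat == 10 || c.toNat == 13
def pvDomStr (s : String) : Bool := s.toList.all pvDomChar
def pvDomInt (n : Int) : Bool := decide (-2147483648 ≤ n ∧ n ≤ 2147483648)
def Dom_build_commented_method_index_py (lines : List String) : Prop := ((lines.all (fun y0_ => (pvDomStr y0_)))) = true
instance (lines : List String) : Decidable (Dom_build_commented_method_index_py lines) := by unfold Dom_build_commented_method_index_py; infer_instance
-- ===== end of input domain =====

-- B replaces A's per-commented-line forward rescan by one backward pass that precomputes the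
-- nearest following non-comment modifier line; each commented line is then answered by one lookup.


-- ===== PORT A =====
def pvAMods : List String := ["public", "private", "protected", "def ", "function ", "class "]

-- inner 'for j in range(i+1, len(lines))' loop with its 'continue'/'break' as structural
-- recursion over the remaining range; lines[j] is always in range here, so pyGetD is exact
def pvAScan (lines : List String) : List Int → PySem.Dict Int Bool → PySem.Dict Int Bool
  | [], d => d
  | j :: rest, d =>
    let next_line := PySem.Str.strip (PySem.List.pyGetD lines j "")
    if PySem.Str.startswith next_line "//" then pvAScan lines rest d
    else if pvAMods.any (fun m => PySem.Str.isIn m next_line) then d.insert (j + 1) true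
    else pvAScan lines rest d

def build_commented_method_index_py (lines : List String) : List (Int × Bool) :=
  ((PySem.List.enumerate lines 0).foldl (fun d p =>
      let stripped := PySem.Str.strip p.2
      if PySem.Str.startswith stripped "//" && pvAMods.any (fun m => PySem.Str.isIn m stripped) then
        pvAScan lines (PySem.List.pyRange (p.1 + 1) (PySem.List.len lines) 1) d
      else d) PySem.Dict.empty).items

-- ===== PORT B =====
def pvBMods : List String := ["public", "private", "protected", "def ", "function ", "class "]

def pvBIsTarget (line : String) : Bool :=
  let s := PySem.Str.strip line
  !(PySem.Str.startswith s "//") && pvBMods.any (fun m => PySem.Str.isIn m s)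

-- Source B's backward pass filling nxt (length n+1, last entry None), right to left
def pvBNextArr : List String → Int → List (Option Int)
  | [], _ => [none]
  | l :: rest, i =>
    let tail := pvBNextArr rest (i + 1)
    (if pvBIsTarget l then some i else tail.headD none) :: tail

def build_commented_method_index_py_alt (lines : List String) : List (Int × Bool) :=
  let nxt := pvBNextArr lines 0
  ((PySem.List.enumerate lines 0).foldl (fun d p =>
      let s := PySem.Str.strip p.2
      if PySem.Str.startswith s "//" && pvBMods.any (fun m => PySem.Str.isIn m s) then
        match PySem.List.pyGetD nxt (p.1 + 1) none with
        | some j => d.insert (j + 1) true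
        | none => d
      else d) PySem.Dict.empty).items

-- ===== PRECONDITION & SPEC =====
def Spec_build_commented_method_index_py (lines : List String) (out : List (Int × Bool)) : Prop := out = build_commented_method_index_py_alt lines
instance (lines : List String) (out : List (Int × Bool)) : Decidable (Spec_build_commented_method_index_py lines out) := by unfold Spec_build_commented_method_index_py; infer_instance

-- ===== CLAIM (what is proved, stated in full; the proofs are below) =====
def Claim_equal_build_commented_method_index_py : Prop := ∀ (lines : List String), Dom_build_commented_method_index_py lines → Spec_build_commented_method_index_py lines (build_commented_method_index_py lines)

-- ===== LEMMAS AND PROOFS =====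

-- proof-only spec: first index ≥ the current one whose line is a non-comment modifier line
def pvFirstT : List String → Int → Option Int
  | [], _ => none
  | l :: rest, i => if pvBIsTarget l then some i else pvFirstT rest (i + 1)

lemma pvBNextArr_getD (ls : List String) : ∀ (i : Int) (k : Nat), k ≤ ls.length →
    (pvBNextArr ls i).getD k none = pvFirstT (ls.drop k) (i + k) := by
  induction ls with
  | nil =>
    intro i k hk
    cases k with
    | zero => simp [pvBNextArr, pvFirstT]
    | succ k => simp at hk
  | cons l rest ih =>
    intro i k hk
    cases k with
    | zero =>
      have h0 := ih (i + 1) 0 (Nat.zero_le _)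
      cases hA : pvBNextArr rest (i + 1) with
      | nil => cases rest <;> simp [pvBNextArr] at hA
      | cons x xs =>
        rw [hA] at h0
        cases hT : pvBIsTarget l with
        | true => simp [pvBNextArr, pvFirstT, hT, hA]
        | false =>
          simp only [pvBNextArr, hA]
          simpa [pvFirstT, hT] using h0
    | succ k =>
      have hk' := ih (i + 1) k (by simpa using hk)
      simp only [pvBNextArr, List.getD_cons_succ]
      rw [hk', List.drop_succ_cons]
      congr 1
      push_cast; ring

lemma pvScan_eq (ls : List String) (m : Nat) : ∀ (a : Int) (d : PySem.Dict Int Bool),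
    0 ≤ a → ls.length ≤ a.toNat + m →
    pvAScan ls (PySem.List.pyRange a (PySem.List.len ls) 1) d =
      (match pvFirstT (ls.drop a.toNat) a with
       | some j => d.insert (j + 1) true
       | none => d) := by
  have hlen' : PySem.List.len ls = (ls.length : Int) := by simp
  induction m with
  | zero =>
    intro a d ha hm
    rw [PySem.List.pyRange_one_eq_nil (by omega)]
    rw [List.drop_eq_nil_of_le (by omega)]
    simp [pvAScan, pvFirstT]
  | succ m ih =>
    intro a d ha hm
    by_cases hlt : a < PySem.List.len ls
    · have hna : a.toNat < ls.length := by omega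
      rw [PySem.List.pyRange_one_cons hlt]
      have hdrop : ls.drop a.toNat = ls[a.toNat] :: ls.drop (a.toNat + 1) :=
        List.drop_eq_getElem_cons hna
      have hget : PySem.List.pyGetD ls a "" = ls[a.toNat] :=
        PySem.List.pyGetD_eq_getElem ls "" ha (by omega)
      have hrec := ih (a + 1) d (by omega) (by omega)
      rw [show (a + 1).toNat = a.toNat + 1 from by omega] at hrec
      simp only [pvAScan, hget, hdrop, pvFirstT]
      by_cases hS : PySem.Str.startswith (PySem.Str.strip ls[a.toNat]) "//" = true
      · have hT : pvBIsTarget ls[a.toNat] = false := by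
          simp only [pvBIsTarget]
          rw [hS]
          simp only [Bool.not_true, Bool.false_and]
        rw [if_pos hS, hT, if_neg (by simp)]
        exact hrec
      · by_cases hM : (pvAMods.any fun mm => PySem.Str.isIn mm (PySem.Str.strip ls[a.toNat])) = true
        · have hM' : (pvBMods.any fun mm => PySem.Str.isIn mm (PySem.Str.strip ls[a.toNat])) = true := hM
          have hT : pvBIsTarget ls[a.toNat] = true := by
            simp only [pvBIsTarget]
            simp only [Bool.not_eq_true] at hS
            rw [hS, hM']
            simp only [Bool.not_false, Bool.true_and]
          rw [if_neg hS, if_pos hM, hT, if_pos rfl]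
        · have hM' : ¬ (pvBMods.any fun mm => PySem.Str.isIn mm (PySem.Str.strip ls[a.toNat])) = true := hM
          have hT : pvBIsTarget ls[a.toNat] = false := by
            simp only [pvBIsTarget]
            simp only [Bool.not_eq_true] at hM'
            rw [hM']
            simp only [Bool.and_false]
          rw [if_neg hS, if_neg hM, hT, if_neg (by simp)]
          exact hrec
    · rw [PySem.List.pyRange_one_eq_nil (by omega)]
      rw [List.drop_eq_nil_of_le (by omega)]
      simp [pvAScan, pvFirstT]

-- ===== VERDICT (by name: the statement is the Claim_ definition above) =====
set_option maxHeartbeats 1000000 in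
theorem build_commented_method_index_py_spec : Claim_equal_build_commented_method_index_py := by
  intro lines _
  unfold Spec_build_commented_method_index_py
  unfold build_commented_method_index_py build_commented_method_index_py_alt
  congr 1
  apply PySem.List.foldl_congr_mem
  intro d p hp
  rcases (PySem.List.mem_enumerate_iff _ _ _).1 hp with ⟨k, hk, rfl⟩
  dsimp only
  by_cases hC : (PySem.Str.startswith (PySem.Str.strip lines[k]) "//" &&
      pvAMods.any fun m => PySem.Str.isIn m (PySem.Str.strip lines[k])) = true
  · have hC' : (PySem.Str.startswith (PySem.Str.strip lines[k]) "//" &&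
        pvBMods.any fun m => PySem.Str.isIn m (PySem.Str.strip lines[k])) = true := hC
    rw [if_pos hC, if_pos hC']
    have hA := pvScan_eq lines lines.length (0 + (k : Int) + 1) d (by omega) (by omega)
    have hB : PySem.List.pyGetD (pvBNextArr lines 0) (0 + (k : Int) + 1) none =
        pvFirstT (lines.drop (k + 1)) (0 + (k : Int) + 1) := by
      rw [show (0 : Int) + (k : Int) + 1 = ((k + 1 : Nat) : Int) from by push_cast; ring,
        PySem.List.pyGetD_natCast]
      rw [pvBNextArr_getD lines 0 (k + 1) (by omega)]
      rw [show (((k + 1 : Nat)) : Int) = 0 + (k : Int) + 1 from by push_cast; ring, zero_add]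
    rw [hA, hB]
    rw [show (0 + (k : Int) + 1).toNat = k + 1 from by omega]
  · have hC' : ¬ (PySem.Str.startswith (PySem.Str.strip lines[k]) "//" &&
        pvBMods.any fun m => PySem.Str.isIn m (PySem.Str.strip lines[k])) = true := hC
    rw [if_neg hC, if_neg hC']
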